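-- pv_equiv track=rewrite | github.com/ChandruMIT-o/Tournament-of-Strategies-MIT | strategies/psv.py | psv
-- ===== SOURCE A (Python) =====
-- def psv(own, opp):
--     def alternating_booleans(length):
--         true_block = 1
--         false_block = 1
--         result = []
--         cycle = 0
--         temp = 0
--         while len(result) < length:
--
--             if temp % 9 == 0:
--                 false_block = 3
--                 true_block = 2
--             elif temp % 9 == 1:
--                 false_block = 2
--                 true_block = 1
--             elif temp % 9 == 2:
--                 false_block = 1
--                 true_block = 3
--             elif temp % 9 == 3:
--                 false_block = 2
--                 true_block = 2
--             elif temp % 9 == 4: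
--                 false_block = 1
--                 true_block = 9
--             elif temp % 9 == 5:
--                 false_block = 6
--                 true_block = 1
--             elif temp % 9 == 6:
--                 false_block = 2
--                 true_block = 3
--             elif temp % 9 == 7:
--                 false_block = 3
--                 true_block = 2
--             elif temp % 9 == 8:
--                 false_block = 4
--                 true_block = 3
--
--             result.extend([False] * (false_block + cycle))
--             result.extend([True] * true_block)
--
--             temp += 1
--
--         return result[:length]
--
--     length = len(own)
--
--     return alternating_booleans(length+1)[-1]
-- ===== SOURCE B (Python) =====
-- # The generated pattern is periodic: `cycle` stays 0 forever, and the block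
-- # sizes depend only on temp % 9, so one full sweep of temp over 9 values
-- # always emits the same 50 booleans.  Precompute that one period once and
-- # answer by modular indexing -- O(1) instead of building a list of len(own)+1.
-- _PATTERN = (
--     False, False, False, True, True, False, False, True, False, True,
--     True, True, False, False, True, True, False, True, True, True,
--     True, True, True, True, True, True, False, False, False, False,
--     False, False, True, False, False, True, True, True, False, False,
--     False, True, True, False, False, False, False, True, True, True,
-- )
--
-- def psv(own, opp):
--     return _PATTERN[len(own) % 50]
-- ===== Notes on version B (the rewrite author's own statement) =====
-- stated objective: faster
-- what changed: Replaced the loop that materialises the whole boolean pattern up to len(own)+1 with a precomputed 50-element period indexed by len(own) % 50, since the pattern is periodic (cycle is constantly 0).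
import Mathlib
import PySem

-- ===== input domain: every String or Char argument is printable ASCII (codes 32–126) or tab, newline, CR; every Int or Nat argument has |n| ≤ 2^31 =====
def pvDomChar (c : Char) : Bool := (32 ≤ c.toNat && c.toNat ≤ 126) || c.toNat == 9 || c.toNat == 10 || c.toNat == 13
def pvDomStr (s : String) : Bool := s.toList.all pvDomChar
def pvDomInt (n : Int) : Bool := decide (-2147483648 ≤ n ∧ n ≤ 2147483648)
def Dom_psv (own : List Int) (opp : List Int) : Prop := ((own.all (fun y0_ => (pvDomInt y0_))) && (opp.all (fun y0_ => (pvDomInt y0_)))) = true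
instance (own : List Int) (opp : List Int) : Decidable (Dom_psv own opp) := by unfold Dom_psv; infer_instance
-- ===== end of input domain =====

-- B replaces A's list-building loop by a precomputed 50-element period indexed
-- by len(own) % 50 (the pattern is periodic since `cycle` stays 0): O(1) vs O(n).

-- ===== PORT A =====
-- the if/elif chain of the Python loop body, selecting (false_block, true_block)
def psvStep (fb tb temp : Int) : Int × Int :=
  if PySem.Int.mod temp 9 = 0 then (3, 2)
  else if PySem.Int.mod temp 9 = 1 then (2, 1)
  else if PySem.Int.mod temp 9 = 2 then (1, 3)
  else if PySem.Int.mod temp 9 = 3 then (2, 2)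
  else if PySem.Int.mod temp 9 = 4 then (1, 9)
  else if PySem.Int.mod temp 9 = 5 then (6, 1)
  else if PySem.Int.mod temp 9 = 6 then (2, 3)
  else if PySem.Int.mod temp 9 = 7 then (3, 2)
  else if PySem.Int.mod temp 9 = 8 then (4, 3)
  else (fb, tb)

-- the true_block of the selected pair is always ≥ 1 (needed for termination)
theorem psvStep_snd_pos (fb tb temp : Int) : 1 ≤ (psvStep fb tb temp).2 := by
  have h0 : 0 ≤ PySem.Int.mod temp 9 := PySem.Int.mod_nonneg temp (by norm_num)
  have h9 : PySem.Int.mod temp 9 < 9 := PySem.Int.mod_lt temp (by norm_num)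
  unfold psvStep
  split_ifs <;> simp_all <;> omega

-- the while loop of alternating_booleans, state = (false_block, true_block, cycle, temp, result)
def psvLoop (length : Nat) (fb tb cycle temp : Int) (result : List Bool) : List Bool :=
  if _h : result.length < length then
    let p := psvStep fb tb temp
    psvLoop length p.1 p.2 cycle (temp + 1)
      (result ++ List.replicate (p.1 + cycle).toNat false ++ List.replicate p.2.toNat true)
  else result
  termination_by length - result.length
  decreasing_by
    have := psvStep_snd_pos fb tb temp
    simp only [List.length_append, List.length_replicate]
    omega

-- length/result inlined: alternating_booleans(length+1)[-1] with length = len(own);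
-- [-1]: the slice has length+1 ≥ 1 elements, so pyGet? is always some; getD false is never used
def psv (own : List Int) (opp : List Int) : Bool :=
  (PySem.List.pyGet? (PySem.List.slice (psvLoop (own.length + 1) 1 1 0 0 []) none
    (some ((own.length : Int) + 1))) (-1)).getD false

-- ===== PORT B =====
def patTable : List Bool :=
  [false, false, false, true, true, false, false, true, false, true,
   true, true, false, false, true, true, false, true, true, true,
   true, true, true, true, true, true, false, false, false, false,
   false, false, true, false, false, true, true, true, false, false,
   false, true, true, false, false, false, false, true, true, true]

def psv_alt (own : List Int) (opp : List Int) : Bool :=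
  patTable.getD (own.length % 50) false

-- ===== PRECONDITION & SPEC =====
def Spec_psv (own : List Int) (opp : List Int) (out : Bool) : Prop := out = psv_alt own opp
instance (own : List Int) (opp : List Int) (out : Bool) : Decidable (Spec_psv own opp out) := by unfold Spec_psv; infer_instance

-- ===== CLAIM (what is proved, stated in full; the proofs are below) =====
def Claim_equal_psv : Prop := ∀ (own : List Int) (opp : List Int), Dom_psv own opp → Spec_psv own opp (psv own opp)

-- ===== LEMMAS AND PROOFS =====

-- block sizes as functions of the step counter
def fbN (t : Nat) : Nat :=
  match t % 9 with | 0 => 3 | 1 => 2 | 2 => 1 | 3 => 2 | 4 => 1 | 5 => 6 | 6 => 2 | 7 => 3 | _ => 4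
def tbN (t : Nat) : Nat :=
  match t % 9 with | 0 => 2 | 1 => 1 | 2 => 3 | 3 => 2 | 4 => 9 | 5 => 1 | 6 => 3 | 7 => 2 | _ => 3

-- total pattern length emitted after t loop iterations
def S : Nat → Nat
  | 0 => 0
  | t + 1 => S t + fbN t + tbN t

-- the periodic pattern B reads off
def fpat (n : Nat) : Bool := patTable.getD (n % 50) false

theorem psvStep_eq (fb tb : Int) (t : Nat) :
    psvStep fb tb (t : Int) = ((fbN t : Int), (tbN t : Int)) := by
  have h9 : t % 9 < 9 := Nat.mod_lt _ (by norm_num)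
  have hm : PySem.Int.mod (t : Int) 9 = ((t % 9 : Nat) : Int) := by
    exact_mod_cast PySem.Int.mod_natCast t 9
  set k := t % 9 with hk
  unfold psvStep fbN tbN
  rw [hm, ← hk]
  interval_cases k <;> simp

theorem fbN_add9 (t : Nat) : fbN (t + 9) = fbN t := by simp [fbN, Nat.add_mod_right]
theorem tbN_add9 (t : Nat) : tbN (t + 9) = tbN t := by simp [tbN, Nat.add_mod_right]

theorem tbN_pos (t : Nat) : 1 ≤ tbN t := by
  have h9 : t % 9 < 9 := Nat.mod_lt _ (by norm_num)
  unfold tbN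
  set k := t % 9 with hk
  interval_cases k <;> simp

theorem S_add9 (t : Nat) : S (t + 9) = S t + 50 := by
  induction t with
  | zero => decide
  | succ n ih =>
    have h : n + 1 + 9 = (n + 9) + 1 := by omega
    rw [h, show S ((n + 9) + 1) = S (n + 9) + fbN (n + 9) + tbN (n + 9) from rfl, ih,
      fbN_add9, tbN_add9, show S (n + 1) = S n + fbN n + tbN n from rfl]
    omega

theorem fpat_add50 (n : Nat) : fpat (n + 50) = fpat n := by
  simp [fpat, Nat.add_mod_right]

theorem chunk (t : Nat) :
    (∀ j < fbN t, fpat (S t + j) = false) ∧ (∀ j < tbN t, fpat (S t + fbN t + j) = true) := by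
  induction t using Nat.strong_induction_on with
  | _ t ih =>
    by_cases h : t < 9
    · interval_cases t <;> exact ⟨by decide, by decide⟩
    · obtain ⟨s, rfl⟩ : ∃ s, t = s + 9 := ⟨t - 9, by omega⟩
      obtain ⟨h1, h2⟩ := ih s (by omega)
      refine ⟨fun j hj => ?_, fun j hj => ?_⟩
      · rw [S_add9, show S s + 50 + j = (S s + j) + 50 by omega, fpat_add50]
        exact h1 j (by rwa [fbN_add9] at hj)
      · rw [S_add9, fbN_add9, show S s + 50 + fbN s + j = (S s + fbN s + j) + 50 by omega,
          fpat_add50]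
        exact h2 j (by rwa [tbN_add9] at hj)

theorem map_range_add (g : Nat → Bool) (m a : Nat) (c : Bool)
    (h : ∀ j < a, g (m + j) = c) :
    (List.range (m + a)).map g = (List.range m).map g ++ List.replicate a c := by
  rw [List.range_add, List.map_append, List.map_map]
  congr 1
  refine List.eq_replicate_iff.mpr ⟨by simp, ?_⟩
  intro b hb
  simp only [List.mem_map, List.mem_range, Function.comp] at hb
  obtain ⟨j, hj, rfl⟩ := hb
  exact h j hj

theorem loop_spec (n : Nat) : ∀ (L : Nat) (fb tb : Int) (t : Nat), L ≤ S t + n →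
    ∃ m, L ≤ S m ∧
      psvLoop L fb tb 0 (t : Int) ((List.range (S t)).map fpat) =
        (List.range (S m)).map fpat := by
  induction n with
  | zero =>
    intro L fb tb t hL
    refine ⟨t, by omega, ?_⟩
    rw [psvLoop]
    simp only [List.length_map, List.length_range]
    rw [dif_neg (by omega)]
  | succ n ih =>
    intro L fb tb t hL
    by_cases h : S t < L
    · rw [psvLoop]
      simp only [List.length_map, List.length_range]
      rw [dif_pos h]
      have hstep := psvStep_eq fb tb t
      have hchunk := chunk t
      have hres : ((List.range (S t)).map fpat ++
            List.replicate ((psvStep fb tb (t : Int)).1 + 0).toNat false ++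
            List.replicate (psvStep fb tb (t : Int)).2.toNat true) =
          (List.range (S (t + 1))).map fpat := by
        rw [hstep]
        simp only [add_zero, Int.toNat_natCast]
        rw [show S (t + 1) = (S t + fbN t) + tbN t from rfl]
        rw [map_range_add fpat (S t + fbN t) (tbN t) true hchunk.2,
            map_range_add fpat (S t) (fbN t) false hchunk.1]
      rw [hres, show ((t : Int) + 1) = ((t + 1 : Nat) : Int) by push_cast; ring]
      have htb := tbN_pos t
      exact ih L (psvStep fb tb (t : Int)).1 (psvStep fb tb (t : Int)).2 (t + 1)
        (by rw [show S (t + 1) = S t + fbN t + tbN t from rfl]; omega)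
    · refine ⟨t, by omega, ?_⟩
      rw [psvLoop]
      simp only [List.length_map, List.length_range]
      rw [dif_neg h]

-- ===== VERDICT (by name: the statement is the Claim_ definition above) =====
theorem psv_spec : Claim_equal_psv := by
  intro own opp _
  unfold Spec_psv psv psv_alt
  obtain ⟨m, hm, heq⟩ := loop_spec (own.length + 1) (own.length + 1) 1 1 0
    (by simp [S])
  have h0 : ((0 : Nat) : Int) = 0 := rfl
  rw [h0] at heq
  simp only [show S 0 = 0 from rfl, List.range_zero, List.map_nil] at heq
  rw [heq]
  have hslice : PySem.List.slice ((List.range (S m)).map fpat) none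
      (some ((own.length : Int) + 1)) = (List.range (own.length + 1)).map fpat := by
    rw [show ((own.length : Int) + 1) = ((own.length + 1 : Nat) : Int) by push_cast; ring,
        PySem.List.slice_to_natCast]
    rw [← List.map_take, List.take_range, Nat.min_eq_left (by omega)]
  rw [hslice, List.range_succ, List.map_append, List.map_singleton,
      PySem.List.pyGet?_neg_one_append_singleton]
  rfl
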